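-- pv_equiv track=rewrite | github.com/turpured/SeanB1995o | tools/hdf_dev_eco_tool/command_line/driver_add/liteos/mk_file_add_config.py | find_makefile_file_end_index
-- ===== SOURCE A (Python) =====
-- def find_makefile_file_end_index(date_lines, model_name):
--     file_end_flag = "include $(HDF_DRIVER)"
--     end_index = 0
--     model_dir_name = ("%s_ROOT_DIR" % model_name.upper())
--     model_dir_value = ""
--
--     for index, line in enumerate(date_lines):
--         if line.startswith("#"):
--             continue
--         elif line.strip().startswith(file_end_flag):
--             end_index = index
--         elif line.strip().startswith(model_dir_name):
--             model_dir_value = line.split("=")[-1].strip()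
--         else:
--             continue
--     result_tuple = (end_index, model_dir_name, model_dir_value)
--     return result_tuple
-- ===== SOURCE B (Python) =====
-- def find_makefile_file_end_index(date_lines, model_name):
--     file_end_flag = "include $(HDF_DRIVER)"
--     model_dir_name = "%s_ROOT_DIR" % model_name.upper()
--
--     end_index = 0
--     for i in range(len(date_lines) - 1, -1, -1):
--         line = date_lines[i]
--         if not line.startswith("#") and line.strip().startswith(file_end_flag):
--             end_index = i
--             break
--
--     model_dir_value = ""
--     for line in reversed(date_lines):
--         if not line.startswith("#") and line.strip().startswith(model_dir_name):
--             model_dir_value = line.split("=")[-1].strip()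
--             break
--
--     return (end_index, model_dir_name, model_dir_value)
-- ===== Notes on version B (the rewrite author's own statement) =====
-- stated objective: idiomatic
-- what changed: Replaces A's single forward loop that keeps overwriting two accumulators with two independent reverse scans that each stop at the first (i.e. last) matching line; the elif chain disappears because a stripped line can never start with both 'include $(HDF_DRIVER)' and the all-uppercase '<MODEL>_ROOT_DIR' marker (proved in Lean).
import Mathlib
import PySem

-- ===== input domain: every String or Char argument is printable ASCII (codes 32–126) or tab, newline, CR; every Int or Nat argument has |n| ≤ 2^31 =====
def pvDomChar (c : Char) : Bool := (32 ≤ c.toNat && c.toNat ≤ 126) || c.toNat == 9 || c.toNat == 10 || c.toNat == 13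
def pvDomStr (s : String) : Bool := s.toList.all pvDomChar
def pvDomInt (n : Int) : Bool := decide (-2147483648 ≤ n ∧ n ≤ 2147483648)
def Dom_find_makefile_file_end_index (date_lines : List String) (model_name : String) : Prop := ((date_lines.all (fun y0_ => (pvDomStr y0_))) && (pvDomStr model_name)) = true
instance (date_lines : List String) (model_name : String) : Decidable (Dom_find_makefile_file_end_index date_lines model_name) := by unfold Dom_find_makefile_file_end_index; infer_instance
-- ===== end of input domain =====

-- B replaces A's forward accumulate-and-overwrite loop by two independent reverse scans
-- that stop at the first match (idiomatic "last match" search); same result, proved equal.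


-- ===== PORT A =====
-- line.split("=")[-1].strip()  (split with a nonempty separator never returns an empty list,
-- so [-1] is the last element; getD defaults are unreachable)
def pvSplitLastStrip (line : String) : String :=
  PySem.Str.strip ((((PySem.Str.split? line "=").getD []).getLast?).getD "")

-- the body of A's for-loop, state = (end_index, model_dir_value)
def pvStepA (file_end_flag model_dir_name : String) (st : Int × String) (p : Int × String) : Int × String :=
  if PySem.Str.startswith p.2 "#" then st
  else if PySem.Str.startswith (PySem.Str.strip p.2) file_end_flag then (p.1, st.2)
  else if PySem.Str.startswith (PySem.Str.strip p.2) model_dir_name then (st.1, pvSplitLastStrip p.2)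
  else st

def find_makefile_file_end_index (date_lines : List String) (model_name : String) : Int × String × String :=
  let file_end_flag := "include $(HDF_DRIVER)"
  let model_dir_name := PySem.Str.upper model_name ++ "_ROOT_DIR"
  let st := (PySem.List.enumerate date_lines).foldl (pvStepA file_end_flag model_dir_name) ((0 : Int), "")
  (st.1, model_dir_name, st.2)

-- ===== PORT B =====
-- "not line.startswith('#') and line.strip().startswith(pat)"
def pvHit (pat line : String) : Bool :=
  !(PySem.Str.startswith line "#") && PySem.Str.startswith (PySem.Str.strip line) pat

def find_makefile_file_end_index_alt (date_lines : List String) (model_name : String) : Int × String × String :=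
  let file_end_flag := "include $(HDF_DRIVER)"
  let model_dir_name := PySem.Str.upper model_name ++ "_ROOT_DIR"
  -- for i in range(len(date_lines)-1, -1, -1): … break  ≡ first hit of the reversed enumeration
  let end_index : Int :=
    match (PySem.List.enumerate date_lines).reverse.find? (fun p => pvHit file_end_flag p.2) with
    | some p => p.1
    | none => 0
  -- for line in reversed(date_lines): … break
  let model_dir_value : String :=
    match date_lines.reverse.find? (fun line => pvHit model_dir_name line) with
    | some line => pvSplitLastStrip line
    | none => ""
  (end_index, model_dir_name, model_dir_value)

-- ===== PRECONDITION & SPEC =====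
def Spec_find_makefile_file_end_index (date_lines : List String) (model_name : String) (out : Int × String × String) : Prop := out = find_makefile_file_end_index_alt date_lines model_name
instance (date_lines : List String) (model_name : String) (out : Int × String × String) : Decidable (Spec_find_makefile_file_end_index date_lines model_name out) := by unfold Spec_find_makefile_file_end_index; infer_instance

-- ===== CLAIM (what is proved, stated in full; the proofs are below) =====
def Claim_equal_find_makefile_file_end_index : Prop := ∀ (date_lines : List String) (model_name : String), Dom_find_makefile_file_end_index date_lines model_name → Spec_find_makefile_file_end_index date_lines model_name (find_makefile_file_end_index date_lines model_name)

-- ===== LEMMAS AND PROOFS =====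

-- upper() of a character is never the lowercase letter 'i'
lemma pv_upperChar_ne_i (c : Char) : PySem.Chars.upperChar c ≠ 'i' := by
  unfold PySem.Chars.upperChar
  split
  · rename_i h
    simp only [PySem.Chars.islower, Bool.and_eq_true, decide_eq_true_eq, Char.le_def] at h
    have h1 : 97 ≤ c.toNat := h.1
    have h2 : c.toNat ≤ 122 := h.2
    intro he
    have ht := congrArg Char.toNat he
    rw [Char.toNat_ofNat, if_pos (by left; omega : (c.toNat - 32).isValidChar)] at ht
    have : ('i').toNat = 105 := by decide
    omega
  · rename_i h
    intro he; subst he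
    exact h (by decide)

-- a stripped line starting with "include $(HDF_DRIVER)" can never also start with
-- MODEL.upper() + "_ROOT_DIR": upper() output never begins with a lowercase 'i'
lemma pv_exclusive (t : String) (mn : String)
    (h1 : PySem.Str.startswith t "include $(HDF_DRIVER)" = true) :
    PySem.Str.startswith t (PySem.Str.upper mn ++ "_ROOT_DIR") = false := by
  rw [PySem.Str.startswith_eq] at h1 ⊢
  rw [String.toList_append, PySem.Str.toList_upper]
  by_contra hb
  rw [Bool.not_eq_false, PySem.Chars.startswith_iff] at hb
  rw [PySem.Chars.startswith_iff] at h1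
  obtain ⟨u, hu⟩ := h1
  obtain ⟨v, hv⟩ := hb
  rw [← hu] at hv
  cases hmn : mn.toList with
  | nil =>
    rw [hmn] at hv
    simp only [PySem.Chars.upper, List.map_nil, List.nil_append] at hv
    have h9 : "_ROOT_DIR".toList = '_' :: "ROOT_DIR".toList := by decide
    rw [h9] at hv
    have hi : "include $(HDF_DRIVER)".toList = 'i' :: "nclude $(HDF_DRIVER)".toList := by decide
    rw [hi] at hv
    simp only [List.cons_append, List.cons.injEq] at hv
    exact absurd hv.1 (by decide)
  | cons c cs =>
    rw [hmn] at hv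
    simp only [PySem.Chars.upper, List.map_cons] at hv
    have hi : "include $(HDF_DRIVER)".toList = 'i' :: "nclude $(HDF_DRIVER)".toList := by decide
    rw [hi] at hv
    simp only [List.cons_append, List.cons.injEq] at hv
    exact pv_upperChar_ne_i c hv.1

lemma pv_hit_exclusive (mn line : String)
    (h : pvHit "include $(HDF_DRIVER)" line = true) :
    pvHit (PySem.Str.upper mn ++ "_ROOT_DIR") line = false := by
  unfold pvHit at h ⊢
  rw [Bool.and_eq_true] at h
  rw [pv_exclusive _ mn h.2, Bool.and_false]

-- the loop body, characterised through the two hit predicates (uses exclusivity)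
lemma pv_step_char (mn : String) (st : Int × String) (p : Int × String) :
    pvStepA "include $(HDF_DRIVER)" (PySem.Str.upper mn ++ "_ROOT_DIR") st p =
      ((if pvHit "include $(HDF_DRIVER)" p.2 then p.1 else st.1),
       (if pvHit (PySem.Str.upper mn ++ "_ROOT_DIR") p.2 then pvSplitLastStrip p.2 else st.2)) := by
  by_cases hh : PySem.Str.startswith p.2 "#" = true
  · unfold pvStepA pvHit
    simp only [hh, if_true, Bool.not_true, Bool.false_and, Bool.false_eq_true, if_false]
  · rw [Bool.not_eq_true] at hh
    by_cases hf : PySem.Str.startswith (PySem.Str.strip p.2) "include $(HDF_DRIVER)" = true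
    · have hx := pv_hit_exclusive mn p.2 (by unfold pvHit; rw [hh, hf]; rfl)
      unfold pvHit at hx
      rw [hh, Bool.not_false, Bool.true_and] at hx
      unfold pvStepA pvHit
      simp only [hh, hf, hx, Bool.not_false, Bool.true_and, Bool.false_eq_true, if_false, if_true]
    · rw [Bool.not_eq_true] at hf
      unfold pvStepA pvHit
      by_cases hm : PySem.Str.startswith (PySem.Str.strip p.2) (PySem.Str.upper mn ++ "_ROOT_DIR") = true
      · simp only [hh, hf, hm, Bool.not_false, Bool.true_and, Bool.false_eq_true, if_false, if_true]
      · rw [Bool.not_eq_true] at hm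
        simp only [hh, hf, hm, Bool.not_false, Bool.true_and, Bool.false_eq_true, if_false]

-- the whole fold = component-wise "last hit wins", phrased as first hit of the reversal
lemma pv_fold_eq (mn : String) :
    ∀ (xs : List String) (s a : Int) (b : String),
      (PySem.List.enumerate xs s).foldl (pvStepA "include $(HDF_DRIVER)" (PySem.Str.upper mn ++ "_ROOT_DIR")) (a, b) =
      ((match (PySem.List.enumerate xs s).reverse.find? (fun p => pvHit "include $(HDF_DRIVER)" p.2) with
        | some p => p.1
        | none => a),
       (match xs.reverse.find? (fun line => pvHit (PySem.Str.upper mn ++ "_ROOT_DIR") line) with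
        | some line => pvSplitLastStrip line
        | none => b)) := by
  intro xs
  induction xs with
  | nil => intro s a b; simp [PySem.List.enumerate_nil]
  | cons x xs ih =>
    intro s a b
    rw [PySem.List.enumerate_cons]
    simp only [List.foldl_cons, List.reverse_cons, List.find?_append]
    rw [pv_step_char mn (a, b) (s, x), ih]
    cases h1 : (PySem.List.enumerate xs (s + 1)).reverse.find? (fun p => pvHit "include $(HDF_DRIVER)" p.2) <;>
      cases h2 : xs.reverse.find? (fun line => pvHit (PySem.Str.upper mn ++ "_ROOT_DIR") line) <;>
        by_cases hx1 : pvHit "include $(HDF_DRIVER)" x = true <;>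
          by_cases hx2 : pvHit (PySem.Str.upper mn ++ "_ROOT_DIR") x = true <;>
            simp_all [List.find?]

-- ===== VERDICT (by name: the statement is the Claim_ definition above) =====
theorem find_makefile_file_end_index_spec : Claim_equal_find_makefile_file_end_index := by
  intro date_lines model_name _
  unfold Spec_find_makefile_file_end_index
  unfold find_makefile_file_end_index find_makefile_file_end_index_alt
  dsimp only
  rw [pv_fold_eq model_name date_lines 0 0 ""]
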